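-- pv_equiv track=rewrite | github.com/duilio92/competitive-programming | spoj/python/nice-binaries-trees.py | build_tree_depth
-- ===== SOURCE A (Python) =====
-- def build_tree_depth(tree_string):
--     depth = 0
--     if len(tree_string) == 0:
--         return 0, ''
--     if tree_string[0] == 'n':
--         depth_left, remaining_string = build_tree_depth(tree_string[1:])
--         depth_right, remaining_string = build_tree_depth(remaining_string)
--         depth = 1 + max(depth_left, depth_right)
--         return depth, remaining_string
--     else:
--         return 0, tree_string[1:] # if it is a leave depth is 0.
-- ===== SOURCE B (Python) =====
-- def build_tree_depth(tree_string):
--     # Single pass with an integer index and an explicit stack (no string slicing,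
--     # no recursion); slices the leftover suffix exactly once at the end.
--     n = len(tree_string)
--     i = 0
--     stack = []  # None = inner node awaiting left child; int = left depth awaiting right
--     while True:
--         if i < n and tree_string[i] == 'n':
--             stack.append(None)
--             i += 1
--             continue
--         d = 0
--         if i < n:
--             i += 1
--         while True:
--             if not stack:
--                 return d, tree_string[i:]
--             top = stack.pop()
--             if top is None:
--                 stack.append(d)
--                 break
--             d = 1 + max(top, d)
-- ===== Notes on version B (the rewrite author's own statement) =====
-- stated objective: faster
-- what changed: Replaced the doubly-recursive parser that repeatedly slices the string (O(n^2) copying) with an iterative single pass over an integer index and an explicit stack, slicing the leftover suffix once at the end.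
import Mathlib
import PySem

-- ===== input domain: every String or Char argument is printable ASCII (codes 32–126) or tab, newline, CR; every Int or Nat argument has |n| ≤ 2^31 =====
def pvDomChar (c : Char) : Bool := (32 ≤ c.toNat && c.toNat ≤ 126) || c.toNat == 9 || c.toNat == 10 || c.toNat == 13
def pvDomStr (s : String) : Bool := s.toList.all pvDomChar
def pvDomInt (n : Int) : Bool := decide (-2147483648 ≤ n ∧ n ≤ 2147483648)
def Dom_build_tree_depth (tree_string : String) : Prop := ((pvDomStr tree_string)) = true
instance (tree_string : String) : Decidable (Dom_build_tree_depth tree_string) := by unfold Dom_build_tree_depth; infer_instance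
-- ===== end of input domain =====

-- B replaces A's doubly-recursive, string-slicing parser by an iterative single
-- pass over an integer index with an explicit stack (objective: faster).


-- ===== PORT A =====
-- A's recursion on the character list; the subtype carries the fact that the
-- leftover is a suffix of the input (needed for termination of the nested call).
def aRec : (l : List Char) → {p : Int × List Char // p.2 <:+ l}
  | [] => ⟨(0, []), List.nil_suffix⟩
  | c :: rest =>
    if c = 'n' then
      match aRec rest with
      | ⟨(dl, r1), hs1⟩ =>
        match aRec r1 with
        | ⟨(dr, r2), hs2⟩ =>
          ⟨(1 + max dl dr, r2), hs2.trans (hs1.trans (List.suffix_cons c rest))⟩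
    else ⟨(0, rest), List.suffix_cons c rest⟩
termination_by l => l.length
decreasing_by
  · simp
  · have := hs1.length_le
    simp
    omega

def build_tree_depth (tree_string : String) : Int × String :=
  let r := aRec tree_string.toList
  (r.1.1, String.ofList r.1.2)

-- ===== PORT B =====
-- Source B's outer loop (parse phase) and inner unwind loop, as mutual tail recursion;
-- stack entry none = pending inner node, some dl = left depth awaiting right child.
mutual
def bLoop (cs : List Char) (i : Nat) (st : List (Option Int)) : Int × Nat :=
  if i < cs.length ∧ cs.getD i ' ' = 'n' then
    bLoop cs (i + 1) (none :: st)
  else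
    if i < cs.length then bUnwind cs 0 (i + 1) st else bUnwind cs 0 i st
  termination_by (cs.length - i, st.countP (·.isNone), st.length, 1)
def bUnwind (cs : List Char) (d : Int) (i : Nat) (st : List (Option Int)) : Int × Nat :=
  match st with
  | [] => (d, i)
  | none :: st' => bLoop cs i (some d :: st')
  | some dl :: st' => bUnwind cs (1 + max dl d) i st'
  termination_by (cs.length - i, st.countP (·.isNone), st.length, 0)
end

def build_tree_depth_alt (tree_string : String) : Int × String :=
  let cs := tree_string.toList
  let r := bLoop cs 0 []
  (r.1, String.ofList (cs.drop r.2))    -- tree_string[i:] with 0 ≤ i : exact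

-- ===== PRECONDITION & SPEC =====
def Spec_build_tree_depth (tree_string : String) (out : Int × String) : Prop := out = build_tree_depth_alt tree_string
instance (tree_string : String) (out : Int × String) : Decidable (Spec_build_tree_depth tree_string out) := by unfold Spec_build_tree_depth; infer_instance

-- ===== CLAIM (what is proved, stated in full; the proofs are below) =====
def Claim_equal_build_tree_depth : Prop := ∀ (tree_string : String), Dom_build_tree_depth tree_string → Spec_build_tree_depth tree_string (build_tree_depth tree_string)

-- ===== LEMMAS AND PROOFS =====

theorem drop_of_suffix {r cs : List Char} (h : r <:+ cs) :
    cs.drop (cs.length - r.length) = r := by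
  obtain ⟨t, rfl⟩ := h
  simp

theorem aRec_nil : (aRec []).1 = (0, []) := by rw [aRec]

theorem aRec_leaf (c : Char) (rest : List Char) (h : c ≠ 'n') :
    (aRec (c :: rest)).1 = (0, rest) := by
  rw [aRec]; simp [h]

theorem aRec_node (rest : List Char) :
    (aRec ('n' :: rest)).1 =
      (1 + max (aRec rest).1.1 (aRec (aRec rest).1.2).1.1,
        (aRec (aRec rest).1.2).1.2) := by
  rw [aRec]
  rcases h1 : aRec rest with ⟨⟨dl, r1⟩, hs1⟩
  rcases h2 : aRec r1 with ⟨⟨dr, r2⟩, hs2⟩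
  simp [h2]

theorem main_lemma (cs : List Char) :
    ∀ k (l : List Char) (i : Nat) (st : List (Option Int)),
      l.length = k → i ≤ cs.length → cs.drop i = l →
      bLoop cs i st =
        bUnwind cs (aRec l).1.1 (cs.length - (aRec l).1.2.length) st := by
  intro k
  induction k using Nat.strong_induction_on with
  | _ k IH =>
    intro l i st hk hi hdrop
    cases l with
    | nil =>
      have hi' : i = cs.length := by
        have := congrArg List.length hdrop; simp at this; omega
      subst hi'
      rw [bLoop]
      simp [aRec_nil]
    | cons c rest =>
      have hk' : rest.length + 1 = k := by simpa using hk
      have hlen : cs.length - i = rest.length + 1 := by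
        have := congrArg List.length hdrop; simpa using this
      have hi2 : i < cs.length := by omega
      have hget : cs[i]? = some c := by
        have h0 : (List.drop i cs)[0]? = cs[i + 0]? := List.getElem?_drop
        rw [hdrop] at h0; simpa using h0.symm
      have hgetD : cs.getD i ' ' = c := by
        simp [List.getD, hget]
      have hdrop1 : cs.drop (i + 1) = rest := by
        have h1 : List.drop 1 (List.drop i cs) = List.drop (i + 1) cs :=
          List.drop_drop
        rw [← h1, hdrop]; rfl
      by_cases hc : c = 'n'
      · subst hc
        rw [bLoop, if_pos ⟨hi2, hgetD⟩]
        rcases h1 : aRec rest with ⟨⟨dl, r1⟩, hs1⟩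
        have hIH1 := IH rest.length (by omega) rest (i + 1) (none :: st) rfl
          (by omega) hdrop1
        rw [h1] at hIH1
        have hsfx1 : r1 <:+ cs := hs1.trans (hdrop1 ▸ List.drop_suffix (i + 1) cs)
        have hlen1 : r1.length ≤ rest.length := hs1.length_le
        have hj : cs.drop (cs.length - r1.length) = r1 := drop_of_suffix hsfx1
        rcases h2 : aRec r1 with ⟨⟨dr, r2⟩, hs2⟩
        have hIH2 := IH r1.length (by omega) r1 (cs.length - r1.length)
          (some dl :: st) rfl (by omega) hj
        rw [h2] at hIH2
        simp only [] at hIH1 hIH2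
        rw [hIH1, bUnwind, hIH2, bUnwind]
        have hA : (aRec ('n' :: rest)).1 = (1 + max dl dr, r2) := by
          rw [aRec_node, h1]
          simp [h2]
        rw [hA]
      · rw [bLoop, if_neg (by
          rintro ⟨-, h⟩; exact hc (hgetD ▸ h.symm ▸ rfl))]
        rw [if_pos hi2]
        have hA : (aRec (c :: rest)).1 = (0, rest) := aRec_leaf c rest hc
        rw [hA]
        have : cs.length - rest.length = i + 1 := by omega
        rw [this]

-- ===== VERDICT (by name: the statement is the Claim_ definition above) =====
theorem build_tree_depth_spec : Claim_equal_build_tree_depth := by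
  intro s _
  unfold Spec_build_tree_depth build_tree_depth build_tree_depth_alt
  rcases h : aRec s.toList with ⟨⟨d, r⟩, hs⟩
  have hm := main_lemma s.toList s.toList.length s.toList 0 [] rfl (by omega) (by simp)
  rw [h] at hm
  simp only [Nat.sub_zero] at hm
  rw [bUnwind] at hm
  simp [hm]
  rw [show s.length = s.toList.length from rfl, drop_of_suffix hs]
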